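-- pv_equiv track=rewrite | github.com/valleyceo/code_journal | 1. Problems/m. Math/a. Operator - Division - GCD - Water and Jug Problem (Die Hard).py | gcdSolution
-- ===== SOURCE A (Python) =====
-- def gcdSolution(c1: int, c2: int, t: int) -> bool:
--     def gcd(a, b):
--         while b != 0:
--             a, b = b, a % b
--
--         return a
--
--     if c1 + c2 < t:
--         return False
--
--     if c1 == t or c2 == t or c1 + c2 == t:
--         return True
--
--     return t % gcd(c1, c2) == 0
-- ===== SOURCE B (Python) =====
-- def gcdSolution(c1: int, c2: int, t: int) -> bool:
--     if c1 + c2 < t: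
--         return False
--     if t == 0:
--         return True
--     a, b = abs(c1), abs(c2)
--     if a == 0:
--         g = b
--     elif b == 0:
--         g = a
--     else:
--         shift = 0
--         while a % 2 == 0 and b % 2 == 0:
--             a //= 2
--             b //= 2
--             shift += 1
--         while a != 0:
--             while a % 2 == 0:
--                 a //= 2
--             while b % 2 == 0:
--                 b //= 2
--             if a < b:
--                 a, b = b, a
--             a -= b
--         g = b << shift
--     return t % g == 0
-- ===== Notes on version B (the rewrite author's own statement) =====
-- stated objective: alternative
-- what changed: B drops A's c1==t/c2==t/c1+c2==t special-case guards (gcd divides each of them anyway) and replaces A's signed modulo-Euclid gcd by a binary (Stein) gcd on absolute values: strip common factors of 2, then odd-subtraction loop, then shift back.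
import Mathlib
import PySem

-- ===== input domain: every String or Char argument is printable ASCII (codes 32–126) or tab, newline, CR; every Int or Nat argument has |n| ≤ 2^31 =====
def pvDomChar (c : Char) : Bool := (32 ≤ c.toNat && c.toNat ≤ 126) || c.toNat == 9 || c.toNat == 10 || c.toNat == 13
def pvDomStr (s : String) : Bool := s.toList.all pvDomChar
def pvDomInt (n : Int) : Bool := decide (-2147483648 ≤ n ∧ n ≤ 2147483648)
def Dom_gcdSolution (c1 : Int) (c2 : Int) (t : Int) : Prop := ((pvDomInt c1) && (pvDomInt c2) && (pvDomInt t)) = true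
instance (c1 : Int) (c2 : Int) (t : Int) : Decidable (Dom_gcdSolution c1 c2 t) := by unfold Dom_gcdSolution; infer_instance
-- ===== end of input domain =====

-- B replaces A's guard cascade plus signed Euclid by a reachability bound and a binary (Stein) gcd on absolute values; return values proved equal on Pre_.

-- termination measure for A's Euclid while-loop (cited by the port's decreasing_by)
theorem pv_mod_natAbs_lt (a b : Int) (h : b ≠ 0) : (PySem.Int.mod a b).natAbs < b.natAbs := by
  rcases lt_or_gt_of_ne h with hb | hb
  · have := PySem.Int.mod_neg_bounds a hb
    omega
  · have h1 := PySem.Int.mod_nonneg a hb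
    have h2 := PySem.Int.mod_lt a hb
    omega

-- ===== PORT A =====
-- A's inner gcd: the while loop 'while b != 0: a, b = b, a % b; return a'
def gcdLoopA (a b : Int) : Int :=
  if h : b = 0 then a else gcdLoopA b (PySem.Int.mod a b)
termination_by b.natAbs
decreasing_by exact pv_mod_natAbs_lt a b h

def gcdSolution (c1 : Int) (c2 : Int) (t : Int) : Bool :=
  if c1 + c2 < t then false
  else if c1 = t ∨ c2 = t ∨ c1 + c2 = t then true
  else decide (PySem.Int.mod t (gcdLoopA c1 c2) = 0)

-- ===== PORT B =====
-- 'while a % 2 == 0: a //= 2' (Python relies on a ≠ 0; the a ≠ 0 conjunct only makes the Lean function total)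
def removeTwos (a : Nat) : Nat :=
  if h : a ≠ 0 ∧ a % 2 = 0 then removeTwos (a / 2) else a
termination_by a
decreasing_by exact Nat.div_lt_self (Nat.pos_of_ne_zero h.1) one_lt_two

-- cited by steinLoop's decreasing_by
theorem removeTwos_le (a : Nat) : removeTwos a ≤ a := by
  induction a using removeTwos.induct with
  | case1 a h ih =>
    rw [removeTwos, dif_pos h]
    exact le_trans ih (Nat.div_le_self a 2)
  | case2 a h => rw [removeTwos, dif_neg h]

-- 'while a % 2 == 0 and b % 2 == 0: a //= 2; b //= 2; shift += 1' (a ≠ 0 conjunct for totality only)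
def shiftLoop (a b s : Nat) : Nat × Nat × Nat :=
  if h : a ≠ 0 ∧ a % 2 = 0 ∧ b % 2 = 0 then shiftLoop (a / 2) (b / 2) (s + 1) else (a, b, s)
termination_by a
decreasing_by exact Nat.div_lt_self (Nat.pos_of_ne_zero h.1) one_lt_two

-- the outer 'while a != 0' subtraction loop of Source B (the b = 0 branch only makes the
-- Lean function total; Source B never reaches it, as b stays odd inside the loop)
def steinLoop (a b : Nat) : Nat :=
  if ha : a = 0 then b
  else if hb : b = 0 then a
  else
    let a1 := removeTwos a
    let b1 := removeTwos b
    if a1 < b1 then steinLoop (b1 - a1) a1 else steinLoop (a1 - b1) b1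
termination_by a + b
decreasing_by
  · have h1 := removeTwos_le a
    have h2 := removeTwos_le b
    omega
  · have h1 := removeTwos_le a
    have h2 := removeTwos_le b
    omega

def gcdSolution_alt (c1 : Int) (c2 : Int) (t : Int) : Bool :=
  if c1 + c2 < t then false
  else if t = 0 then true
  else
    let a := c1.natAbs
    let b := c2.natAbs
    let g : Nat :=
      if a = 0 then b
      else if b = 0 then a
      else
        let r := shiftLoop a b 0
        steinLoop r.1 r.2.1 <<< r.2.2
    decide (PySem.Int.mod t (g : Int) = 0)

-- ===== PRECONDITION & SPEC =====
-- Pre_ excludes only c1 = c2 = 0 with t < 0, where Python A (and B) raise ZeroDivisionError (t % 0).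
def Pre_gcdSolution (c1 : Int) (c2 : Int) (t : Int) : Prop := ¬ (c1 = 0 ∧ c2 = 0 ∧ t < 0)
instance (c1 : Int) (c2 : Int) (t : Int) : Decidable (Pre_gcdSolution c1 c2 t) := by unfold Pre_gcdSolution; infer_instance
def pvWitness_gcdSolution : Int × Int × Int := (3, 5, 4)

def Spec_gcdSolution (c1 : Int) (c2 : Int) (t : Int) (out : Bool) : Prop := out = gcdSolution_alt c1 c2 t
instance (c1 : Int) (c2 : Int) (t : Int) (out : Bool) : Decidable (Spec_gcdSolution c1 c2 t out) := by unfold Spec_gcdSolution; infer_instance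

-- ===== CLAIM (what is proved, stated in full; the proofs are below) =====
def Claim_equal_gcdSolution : Prop := ∀ (c1 : Int) (c2 : Int) (t : Int), Dom_gcdSolution c1 c2 t → Pre_gcdSolution c1 c2 t → Spec_gcdSolution c1 c2 t (gcdSolution c1 c2 t)

-- ===== LEMMAS AND PROOFS =====

theorem removeTwos_odd (a : Nat) (ha : a ≠ 0) : removeTwos a % 2 = 1 := by
  induction a using removeTwos.induct with
  | case1 a h ih =>
    rw [removeTwos, dif_pos h]
    exact ih (by omega)
  | case2 a h =>
    rw [removeTwos, dif_neg h]
    omega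

theorem removeTwos_of_odd (a : Nat) (h : a % 2 = 1) : removeTwos a = a := by
  rw [removeTwos, dif_neg (by omega)]

theorem gcd_removeTwos_left (a b : Nat) (hb : b % 2 = 1) :
    Nat.gcd (removeTwos a) b = Nat.gcd a b := by
  induction a using removeTwos.induct with
  | case1 a h ih =>
    rw [removeTwos, dif_pos h, ih]
    have h2 : 2 * (a / 2) = a := by omega
    calc Nat.gcd (a / 2) b
        = Nat.gcd (2 * (a / 2)) b :=
          (Nat.gcd_mul_right_left_of_gcd_eq_one
            (Nat.coprime_two_left.mpr (Nat.odd_iff.mpr hb))).symm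
      _ = Nat.gcd a b := by rw [h2]
  | case2 a h => rw [removeTwos, dif_neg h]

theorem gcd_removeTwos (a b : Nat) (h : a % 2 = 1 ∨ b % 2 = 1) :
    Nat.gcd (removeTwos a) (removeTwos b) = Nat.gcd a b := by
  rcases h with h | h
  · rw [removeTwos_of_odd a h, Nat.gcd_comm, gcd_removeTwos_left b a h, Nat.gcd_comm]
  · rw [removeTwos_of_odd b h, gcd_removeTwos_left a b h]

theorem steinLoop_eq_gcd (a b : Nat) (h : a % 2 = 1 ∨ b % 2 = 1) :
    steinLoop a b = Nat.gcd a b := by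
  induction a, b using steinLoop.induct with
  | case1 b => rw [steinLoop, dif_pos rfl]; exact (Nat.gcd_zero_left b).symm
  | case2 a ha => rw [steinLoop, dif_neg ha, dif_pos rfl]; exact (Nat.gcd_zero_right a).symm
  | case3 a b ha hb a1 b1 hlt ih =>
    rw [steinLoop, dif_neg ha, dif_neg hb, if_pos hlt]
    rw [ih (Or.inr (removeTwos_odd a ha))]
    rw [Nat.gcd_sub_self_left (le_of_lt hlt), Nat.gcd_comm]
    exact gcd_removeTwos a b h
  | case4 a b ha hb a1 b1 hlt ih =>
    rw [steinLoop, dif_neg ha, dif_neg hb, if_neg hlt]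
    rw [ih (Or.inr (removeTwos_odd b hb))]
    rw [Nat.gcd_sub_self_left (not_lt.mp hlt)]
    exact gcd_removeTwos a b h

theorem shiftLoop_gcd (a b s : Nat) :
    Nat.gcd (shiftLoop a b s).1 (shiftLoop a b s).2.1 * 2 ^ (shiftLoop a b s).2.2
      = Nat.gcd a b * 2 ^ s := by
  induction a, b, s using shiftLoop.induct with
  | case1 a b s h ih =>
    rw [shiftLoop, dif_pos h, ih]
    have h2 : Nat.gcd a b = 2 * Nat.gcd (a / 2) (b / 2) := by
      conv_lhs => rw [show a = 2 * (a / 2) by omega, show b = 2 * (b / 2) by omega]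
      exact Nat.gcd_mul_left 2 (a / 2) (b / 2)
    rw [h2, pow_succ]
    ring
  | case2 a b s h => rw [shiftLoop, dif_neg h]

theorem shiftLoop_exit (a b s : Nat) (ha : a ≠ 0) :
    (shiftLoop a b s).1 % 2 = 1 ∨ (shiftLoop a b s).2.1 % 2 = 1 := by
  induction a, b, s using shiftLoop.induct with
  | case1 a b s h ih =>
    rw [shiftLoop, dif_pos h]
    exact ih (by omega)
  | case2 a b s h =>
    rw [shiftLoop, dif_neg h]
    simp only []
    omega

theorem altGcd_eq (a b : Nat) :
    (if a = 0 then b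
     else if b = 0 then a
     else
       let r := shiftLoop a b 0
       steinLoop r.1 r.2.1 <<< r.2.2) = Nat.gcd a b := by
  by_cases h0 : a = 0
  · rw [if_pos h0, h0, Nat.gcd_zero_left]
  · rw [if_neg h0]
    by_cases hb0 : b = 0
    · rw [if_pos hb0, hb0, Nat.gcd_zero_right]
    · rw [if_neg hb0]
      show steinLoop (shiftLoop a b 0).1 (shiftLoop a b 0).2.1 <<< (shiftLoop a b 0).2.2
          = Nat.gcd a b
      rw [Nat.shiftLeft_eq, steinLoop_eq_gcd _ _ (shiftLoop_exit a b 0 h0)]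
      have := shiftLoop_gcd a b 0
      simpa using this

theorem gcdLoopA_natAbs (a b : Int) : (gcdLoopA a b).natAbs = Int.gcd a b := by
  induction a, b using gcdLoopA.induct with
  | case1 a => rw [gcdLoopA, dif_pos rfl]; exact (Int.gcd_zero_right a).symm
  | case2 a b h ih =>
    rw [gcdLoopA, dif_neg h, ih]
    have hm : PySem.Int.mod a b = a - PySem.Int.floordiv a b * b := by
      have := PySem.Int.floordiv_mul_add_mod a b
      linarith
    rw [hm, Int.gcd_sub_mul_right_right b a (PySem.Int.floordiv a b), Int.gcd_comm]

-- A-side divisibility test rephrased through B's gcd of absolute values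
theorem gcdLoopA_dvd_iff (c1 c2 t : Int) :
    gcdLoopA c1 c2 ∣ t ↔ ((Nat.gcd c1.natAbs c2.natAbs : Int)) ∣ t := by
  rw [← Int.natAbs_dvd, gcdLoopA_natAbs, Int.gcd_eq_natAbs_gcd_natAbs]

-- ===== VERDICT (by name: the statement is the Claim_ definition above) =====
theorem gcdSolution_spec : Claim_equal_gcdSolution := by
  intro c1 c2 t _ _
  unfold Spec_gcdSolution gcdSolution gcdSolution_alt
  by_cases h1 : c1 + c2 < t
  · simp [h1]
  · rw [if_neg h1, if_neg h1]
    simp only [altGcd_eq]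
    by_cases h2 : c1 = t ∨ c2 = t ∨ c1 + c2 = t
    · rw [if_pos h2]
      have hdvd : ((Nat.gcd c1.natAbs c2.natAbs : Int)) ∣ t := by
        have d1 : ((Nat.gcd c1.natAbs c2.natAbs : Int)) ∣ c1 := by
          rw [← Int.gcd_eq_natAbs_gcd_natAbs]; exact Int.gcd_dvd_left c1 c2
        have d2 : ((Nat.gcd c1.natAbs c2.natAbs : Int)) ∣ c2 := by
          rw [← Int.gcd_eq_natAbs_gcd_natAbs]; exact Int.gcd_dvd_right c1 c2
        rcases h2 with h | h | h
        · exact h ▸ d1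
        · exact h ▸ d2
        · exact h ▸ dvd_add d1 d2
      have hm : PySem.Int.mod t ((Nat.gcd c1.natAbs c2.natAbs : Int)) = 0 :=
        (PySem.Int.mod_eq_zero_iff_dvd t _).mpr hdvd
      by_cases ht : t = 0
      · rw [if_pos ht]
      · rw [if_neg ht]
        simp [hm]
    · rw [if_neg h2]
      by_cases ht : t = 0
      · rw [if_pos ht, ht]
        have : PySem.Int.mod 0 (gcdLoopA c1 c2) = 0 :=
          (PySem.Int.mod_eq_zero_iff_dvd 0 _).mpr (dvd_zero _)
        simp [this]
      · rw [if_neg ht]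
        simp only [decide_eq_decide, PySem.Int.mod_eq_zero_iff_dvd]
        exact gcdLoopA_dvd_iff c1 c2 t
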